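-- pv_equiv track=rewrite | github.com/rmb707/RhymeLM | rhymelm/rag/schemes.py | parse_rhyme_scheme
-- ===== SOURCE A (Python) =====
-- RHYME_SCHEMES: dict[str, str | None] = {
--     "AABB": "AABBCCDDEEFFGGHHIIJJ",
--     "ABAB": "ABABCDCDEFEFGHGHIJIJ",
--     "ABBA": "ABBACDDCEFFEGHHGIJJI",
--     "AAAA": "AAAABBBBCCCCDDDDEEEE",
--     "free": None,
-- }
--
-- def parse_rhyme_scheme(scheme: str, num_bars: int) -> list[int]:
--     """Map a scheme name (or raw pattern string) to per-line group IDs.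
--
--     Example: parse_rhyme_scheme("AABB", 8) -> [0, 0, 1, 1, 2, 2, 3, 3]
--     """
--     pattern = RHYME_SCHEMES.get(scheme, scheme)
--     if pattern is None:
--         return list(range(num_bars))
--
--     label_map: dict[str, int] = {}
--     groups: list[int] = []
--     counter = 0
--     for ch in pattern:
--         if ch not in label_map:
--             label_map[ch] = counter
--             counter += 1
--         groups.append(label_map[ch])
--
--     while len(groups) < num_bars:
--         groups.append(groups[-1] + 1)
--     return groups[:num_bars]
-- ===== SOURCE B (Python) =====
-- RHYME_SCHEMES: dict[str, str | None] = {
--     "AABB": "AABBCCDDEEFFGGHHIIJJ",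
--     "ABAB": "ABABCDCDEFEFGHGHIJIJ",
--     "ABBA": "ABBACDDCEFFEGHHGIJJI",
--     "AAAA": "AAAABBBBCCCCDDDDEEEE",
--     "free": None,
-- }
--
-- def parse_rhyme_scheme(scheme: str, num_bars: int) -> list[int]:
--     pattern = RHYME_SCHEMES.get(scheme, scheme)
--     if pattern is None:
--         return list(range(num_bars))
--     # Stateless characterization: the group id of a character is the number of
--     # distinct characters occurring strictly before its first occurrence.
--     groups = [len(set(pattern[:pattern.index(ch)])) for ch in pattern]
--     if len(groups) < num_bars:
--         last = groups[-1]
--         groups += list(range(last + 1, last + 1 + num_bars - len(groups)))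
--     return groups[:num_bars]
-- ===== Notes on version B (the rewrite author's own statement) =====
-- stated objective: alternative
-- what changed: Drops A's mutable label_map/counter state entirely: each line's group id is computed independently as the count of distinct characters preceding that character's first occurrence (len(set(pattern[:pattern.index(ch)]))), and the incremental while-append padding becomes one closed-form range() extension.
import Mathlib
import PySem

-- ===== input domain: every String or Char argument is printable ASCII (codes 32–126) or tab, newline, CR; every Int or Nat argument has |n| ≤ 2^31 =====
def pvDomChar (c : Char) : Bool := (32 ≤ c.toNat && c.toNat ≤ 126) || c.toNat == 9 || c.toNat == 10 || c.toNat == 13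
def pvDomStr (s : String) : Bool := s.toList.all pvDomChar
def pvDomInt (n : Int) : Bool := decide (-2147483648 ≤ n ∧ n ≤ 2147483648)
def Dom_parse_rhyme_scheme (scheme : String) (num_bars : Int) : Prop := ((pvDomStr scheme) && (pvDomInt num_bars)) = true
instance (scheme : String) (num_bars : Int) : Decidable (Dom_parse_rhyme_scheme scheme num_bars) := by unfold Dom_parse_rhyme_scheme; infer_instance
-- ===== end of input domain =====

-- B drops A's mutable label_map/counter state: each group id is computed independently as the
-- number of distinct characters preceding that character's first occurrence, and A's incremental
-- while-padding becomes one closed-form range extension (objective: alternative, same results).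


-- module constant shared by both Pythons
def RHYME_SCHEMES : PySem.Dict String (Option String) :=
  PySem.Dict.ofList [("AABB", some "AABBCCDDEEFFGGHHIIJJ"),
                     ("ABAB", some "ABABCDCDEFEFGHGHIJIJ"),
                     ("ABBA", some "ABBACDDCEFFEGHHGIJJI"),
                     ("AAAA", some "AAAABBBBCCCCDDDDEEEE"),
                     ("free", none)]

-- ===== PORT A =====
-- A's 'for ch in pattern' loop: state (label_map, groups, counter)
def aLoop : List Char → PySem.Dict Char Int → List Int → Int → List Int
  | [], _, groups, _ => groups
  | ch :: rest, lm, groups, counter =>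
    match lm.get? ch with
    | some v => aLoop rest lm (groups ++ [v]) counter
    | none   => aLoop rest (lm.insert ch counter) (groups ++ [counter]) (counter + 1)

-- A's 'while len(groups) < num_bars' loop; pyGetD guards groups[-1] (Python raises IndexError
-- on the empty list there — excluded by Pre_)
def aPad (groups : List Int) (num_bars : Int) : List Int :=
  if (groups.length : Int) < num_bars then
    aPad (groups ++ [PySem.List.pyGetD groups (-1) 0 + 1]) num_bars
  else groups
termination_by (num_bars - groups.length).toNat
decreasing_by simp; omega

def parse_rhyme_scheme (scheme : String) (num_bars : Int) : List Int :=
  match RHYME_SCHEMES.getD scheme (some scheme) with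
  | none => PySem.List.pyRange 0 num_bars 1
  | some pattern =>
    PySem.List.slice (aPad (aLoop pattern.toList PySem.Dict.empty [] 0) num_bars) none (some num_bars)

-- ===== PORT B =====
-- len(set(pattern[:pattern.index(ch)])) per character; pattern.index always succeeds since
-- ch ∈ pattern, so getD 0 never takes its default.
def parse_rhyme_scheme_alt (scheme : String) (num_bars : Int) : List Int :=
  match RHYME_SCHEMES.getD scheme (some scheme) with
  | none => PySem.List.pyRange 0 num_bars 1
  | some pattern =>
    let cs := pattern.toList
    let groups : List Int := cs.map (fun ch =>
      ((PySem.Set.ofList (PySem.List.slice cs none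
          (some (((PySem.List.index? cs ch).getD 0 : Nat) : Int)))).length : Int))
    let groups2 :=
      if (groups.length : Int) < num_bars then
        groups ++ PySem.List.pyRange (PySem.List.pyGetD groups (-1) 0 + 1)
          (PySem.List.pyGetD groups (-1) 0 + 1 + num_bars - groups.length) 1
      else groups
    PySem.List.slice groups2 none (some num_bars)

-- ===== PRECONDITION & SPEC =====
-- Pre_ excludes only scheme = "" with num_bars > 0: there the resolved pattern is the empty
-- string and Python A raises IndexError on groups[-1] (B raises there too).
def Pre_parse_rhyme_scheme (scheme : String) (num_bars : Int) : Prop :=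
  scheme = "" → num_bars ≤ 0
instance (scheme : String) (num_bars : Int) : Decidable (Pre_parse_rhyme_scheme scheme num_bars) := by
  unfold Pre_parse_rhyme_scheme; infer_instance

def pvWitness_parse_rhyme_scheme : String × Int := ("AABB", 8)

def Spec_parse_rhyme_scheme (scheme : String) (num_bars : Int) (out : List Int) : Prop := out = parse_rhyme_scheme_alt scheme num_bars
instance (scheme : String) (num_bars : Int) (out : List Int) : Decidable (Spec_parse_rhyme_scheme scheme num_bars out) := by unfold Spec_parse_rhyme_scheme; infer_instance

-- ===== CLAIM (what is proved, stated in full; the proofs are below) =====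
def Claim_equal_parse_rhyme_scheme : Prop := ∀ (scheme : String) (num_bars : Int), Dom_parse_rhyme_scheme scheme num_bars → Pre_parse_rhyme_scheme scheme num_bars → Spec_parse_rhyme_scheme scheme num_bars (parse_rhyme_scheme scheme num_bars)

-- ===== LEMMAS AND PROOFS =====

theorem mem_add_self (s : PySem.Set Char) (x : Char) : x ∈ s.add x :=
  (PySem.Set.mem_add s x x).mpr (Or.inr rfl)

theorem idx_foldl_add {s : List Char} {ch : Char} (suf : List Char) (h : ch ∈ s) :
    PySem.List.index? (suf.foldl PySem.Set.add s) ch = PySem.List.index? s ch := by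
  induction suf generalizing s with
  | nil => rfl
  | cons x rest ih =>
    simp only [List.foldl_cons]
    rw [ih ((PySem.Set.mem_add s x ch).mpr (Or.inl h))]
    unfold PySem.Set.add
    split
    · rfl
    · rw [PySem.List.index?_append_of_mem _ h]

theorem idx_append_singleton_ne {l : List Char} {x c : Char} (h : x ≠ c) :
    PySem.List.index? (l ++ [c]) x = PySem.List.index? l x := by
  by_cases hm : x ∈ l
  · exact PySem.List.index?_append_of_mem _ hm
  · have h1 : PySem.List.index? l x = none := by
      rw [← PySem.List.index?_eq_none_iff] at hm; exact hm
    have h2 : x ∉ l ++ [c] := by simp [hm, h]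
    rw [← PySem.List.index?_eq_none_iff] at h2
    rw [h1, h2]

theorem dedup_append (pre suf : List Char) :
    PySem.List.dedup (pre ++ suf) = suf.foldl PySem.Set.add (PySem.List.dedup pre) := by
  simp [PySem.Set.ofList_eq_foldl, List.foldl_append]

-- A's label_map/counter loop assigns each ch its first-occurrence rank among distinct letters
theorem aLoop_eq (suf : List Char) : ∀ (pre : List Char) (lm : PySem.Dict Char Int) (groups : List Int),
    (∀ ch, lm.get? ch = (PySem.List.index? (PySem.List.dedup pre) ch).map (fun k => (k : Int))) →
    aLoop suf lm groups ((PySem.List.dedup pre).length : Int) =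
      groups ++ suf.map (fun ch => (((PySem.List.index? (PySem.List.dedup (pre ++ suf)) ch).getD 0 : Nat) : Int)) := by
  induction suf with
  | nil => intro pre lm groups _; simp [aLoop]
  | cons ch rest ih =>
    intro pre lm groups hinv
    have hidx : PySem.List.index? (PySem.List.dedup (pre ++ ch :: rest)) ch
        = PySem.List.index? (PySem.Set.add (PySem.List.dedup pre) ch) ch := by
      rw [show pre ++ ch :: rest = (pre ++ [ch]) ++ rest by simp, dedup_append, dedup_append]
      exact idx_foldl_add rest (by simp only [List.foldl_cons, List.foldl_nil]; exact mem_add_self _ ch)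
    have hrest : pre ++ ch :: rest = (pre ++ [ch]) ++ rest := by simp
    cases hget : lm.get? ch with
    | some v =>
      have h1 := hinv ch
      rw [hget] at h1
      cases hidx2 : PySem.List.index? (PySem.List.dedup pre) ch with
      | none => rw [hidx2] at h1; simp at h1
      | some k =>
        rw [hidx2] at h1
        have hmem : ch ∈ PySem.List.dedup pre := by
          have := (PySem.List.index?_isSome_iff (PySem.List.dedup pre) ch).mp
          rw [hidx2] at this; exact this rfl
        have hcont : PySem.Set.contains (PySem.List.dedup pre) ch = true := by
          simpa using hmem
        have hpre' : PySem.List.dedup (pre ++ [ch]) = PySem.List.dedup pre := by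
          rw [dedup_append]
          simp only [List.foldl_cons, List.foldl_nil]
          unfold PySem.Set.add
          rw [if_pos hcont]
        have hih := ih (pre ++ [ch]) lm (groups ++ [v]) (by rw [hpre']; exact hinv)
        rw [hpre'] at hih
        have hfix : PySem.List.index? (PySem.List.dedup (pre ++ ch :: rest)) ch = some k := by
          rw [hidx]
          unfold PySem.Set.add
          rw [if_pos hcont]
          exact hidx2
        rw [aLoop, hget]
        dsimp only
        rw [← hrest] at hih
        rw [hih]
        simp only [List.map_cons, hfix, Option.getD_some]
        simp at h1
        rw [h1]
        simp
    | none =>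
      have h1 := hinv ch
      rw [hget] at h1
      have hnm : ch ∉ PySem.List.dedup pre := by
        rw [← PySem.List.index?_eq_none_iff]
        cases hidx2 : PySem.List.index? (PySem.List.dedup pre) ch with
        | none => rfl
        | some k => rw [hidx2] at h1; simp at h1
      have hcont : ¬ PySem.Set.contains (PySem.List.dedup pre) ch = true := by
        simpa using hnm
      have hpre' : PySem.List.dedup (pre ++ [ch]) = PySem.List.dedup pre ++ [ch] := by
        rw [dedup_append]
        simp only [List.foldl_cons, List.foldl_nil]
        unfold PySem.Set.add
        rw [if_neg hcont]
      have hinv' : ∀ x, (lm.insert ch ((PySem.List.dedup pre).length : Int)).get? x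
          = (PySem.List.index? (PySem.List.dedup (pre ++ [ch])) x).map (fun k => (k : Int)) := by
        intro x
        by_cases hx : x = ch
        · subst hx
          rw [PySem.Dict.get?_insert_self, hpre',
            PySem.List.index?_append_singleton_self _ _ hnm]
          rfl
        · rw [PySem.Dict.get?_insert_of_ne _ _ hx, hpre', idx_append_singleton_ne hx, hinv x]
      have hih := ih (pre ++ [ch]) _ (groups ++ [((PySem.List.dedup pre).length : Int)]) hinv'
      rw [hpre'] at hih
      have hfix : PySem.List.index? (PySem.List.dedup (pre ++ ch :: rest)) ch = some (PySem.List.dedup pre).length := by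
        rw [hidx]
        unfold PySem.Set.add
        rw [if_neg hcont]
        exact PySem.List.index?_append_singleton_self _ _ hnm
      rw [aLoop, hget]
      dsimp only
      have hlen : ((PySem.List.dedup pre).length : Int) + 1 = ((PySem.List.dedup pre ++ [ch]).length : Int) := by
        simp
      rw [← hrest] at hih
      rw [hlen, hih]
      simp only [List.map_cons, hfix, Option.getD_some]
      simp

-- the first-occurrence rank among distinct letters equals B's count of distinct letters
-- strictly before the first occurrence
theorem idx_dedup_eq_count (cs : List Char) (ch : Char) (h : ch ∈ cs) :
    PySem.List.index? (PySem.List.dedup cs) ch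
      = some (PySem.List.dedup (cs.take ((PySem.List.index? cs ch).getD 0))).length := by
  cases hj : PySem.List.index? cs ch with
  | none =>
    rw [PySem.List.index?_eq_none_iff] at hj; exact absurd h hj
  | some j =>
    obtain ⟨pre, suf, hcs, hlen, hnp⟩ := (PySem.List.index?_eq_some_iff cs ch j).mp hj
    have htake : cs.take j = pre := by
      rw [hcs, ← hlen, List.take_left]
    have hnd : ch ∉ PySem.List.dedup pre := by simpa using hnp
    have hcont : ¬ PySem.Set.contains (PySem.List.dedup pre) ch = true := by
      simpa using hnd
    rw [hcs, dedup_append]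
    simp only [List.foldl_cons]
    rw [idx_foldl_add suf (by unfold PySem.Set.add; rw [if_neg hcont]; simp)]
    unfold PySem.Set.add
    rw [if_neg hcont, PySem.List.index?_append_singleton_self _ _ hnd]
    have htake' : (pre ++ ch :: suf).take j = pre := by rw [← hcs]; exact htake
    simp [htake']

-- ===== VERDICT (by name: the statement is the Claim_ definition above) =====

-- every pattern stored in RHYME_SCHEMES is nonempty, so an empty resolved pattern forces scheme = ""
theorem pat_ne_empty (scheme p : String) (hs : scheme ≠ "") (hpat : RHYME_SCHEMES.getD scheme (some scheme) = some p) : p ≠ "" := by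
  have hitems : RHYME_SCHEMES.items =
      [("AABB", some "AABBCCDDEEFFGGHHIIJJ"), ("ABAB", some "ABABCDCDEFEFGHGHIJIJ"),
       ("ABBA", some "ABBACDDCEFFEGHHGIJJI"), ("AAAA", some "AAAABBBBCCCCDDDDEEEE"),
       ("free", (none : Option String))] := by decide
  simp only [PySem.Dict.getD, PySem.Dict.get?, hitems, List.find?] at hpat
  split at hpat
  · simp at hpat; subst hpat; decide
  · split at hpat
    · simp at hpat; subst hpat; decide
    · split at hpat
      · simp at hpat; subst hpat; decide
      · split at hpat
        · simp at hpat; subst hpat; decide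
        · split at hpat
          · simp at hpat
          · simp at hpat; subst hpat; exact hs

-- A's one-at-a-time while-padding equals B's single closed-form range extension
theorem aPad_eq (nb : Int) : ∀ (k : Nat) (groups : List Int) (h : groups ≠ []),
    nb - groups.length ≤ k →
    aPad groups nb =
      if (groups.length : Int) < nb then
        groups ++ PySem.List.pyRange (groups.getLast h + 1) (groups.getLast h + 1 + nb - groups.length) 1
      else groups := by
  intro k
  induction k with
  | zero =>
    intro groups h hk
    rw [aPad, if_neg (by omega), if_neg (by omega)]
  | succ k ih =>
    intro groups h hk
    by_cases hlt : (groups.length : Int) < nb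
    · rw [aPad, if_pos hlt, if_pos hlt]
      rw [PySem.List.pyGetD_neg_one _ _ h]
      set L := groups.getLast h with hL
      have hne : groups ++ [L + 1] ≠ [] := by simp
      have hih := ih (groups ++ [L + 1]) hne (by simp; omega)
      have hlast : (groups ++ [L + 1]).getLast hne = L + 1 := by simp
      rw [hlast] at hih
      rw [hih]
      rw [PySem.List.pyRange_one_cons (by omega : L + 1 < L + 1 + nb - groups.length)]
      by_cases hlt2 : ((groups ++ [L + 1]).length : Int) < nb
      · rw [if_pos hlt2]
        have : L + 1 + 1 + nb - ((groups ++ [L + 1]).length : Int) = L + 1 + nb - groups.length := by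
          simp; omega
        rw [this]
        simp
      · rw [if_neg hlt2]
        have hnb : nb = groups.length + 1 := by simp at hlt2; omega
        rw [PySem.List.pyRange_one_eq_nil (by omega)]
    · rw [aPad, if_neg hlt, if_neg hlt]

theorem parse_rhyme_scheme_spec : Claim_equal_parse_rhyme_scheme := by
  intro scheme num_bars _ hpre
  unfold Spec_parse_rhyme_scheme parse_rhyme_scheme parse_rhyme_scheme_alt
  cases hpat : RHYME_SCHEMES.getD scheme (some scheme) with
  | none => rfl
  | some p =>
    dsimp only
    have hg : aLoop p.toList PySem.Dict.empty [] 0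
        = p.toList.map (fun ch => (((PySem.List.index? (PySem.List.dedup p.toList) ch).getD 0 : Nat) : Int)) := by
      have := aLoop_eq p.toList [] PySem.Dict.empty [] (by intro ch; rfl)
      simpa using this
    have hmap : p.toList.map (fun ch => (((PySem.List.index? (PySem.List.dedup p.toList) ch).getD 0 : Nat) : Int))
        = p.toList.map (fun ch =>
            ((PySem.Set.ofList (PySem.List.slice p.toList none
              (some (((PySem.List.index? p.toList ch).getD 0 : Nat) : Int)))).length : Int)) := by
      apply List.map_congr_left
      intro ch hch
      rw [idx_dedup_eq_count p.toList ch hch, PySem.List.slice_to_natCast]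
      simp
    rw [hg, hmap]
    set groups := p.toList.map (fun ch =>
        ((PySem.Set.ofList (PySem.List.slice p.toList none
          (some (((PySem.List.index? p.toList ch).getD 0 : Nat) : Int)))).length : Int)) with hgroups
    by_cases hp : p = ""
    · have hsch : scheme = "" := by
        by_contra hns
        exact pat_ne_empty scheme p hns hpat hp
      have hnb : num_bars ≤ 0 := hpre hsch
      subst hp
      rw [aPad, if_neg (by simp [hgroups]; omega), if_neg (by simp [hgroups]; omega)]
    · have hne : groups ≠ [] := by
        have htl : p.toList ≠ [] := by
          intro hc
          exact hp (String.ext (by simpa using hc))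
        rw [hgroups]
        simpa using htl
      rw [aPad_eq num_bars (num_bars - groups.length).toNat groups hne (by omega)]
      rw [PySem.List.pyGetD_neg_one _ _ hne]
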